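-- pv_equiv track=rewrite | github.com/B199528-2021/Lect_14_functions_own | basecounter.py | countbases
-- ===== SOURCE A (Python) =====
-- def countbases(DNAseq, threshold):
-- 	DNAseq = DNAseq.lower()
-- 	nobase=[]
-- 	for base in DNAseq:
-- 		if (base != "a") and (base != "t") and (base != "g") and (base != "c"):
-- 			# create a list of the undetermined bases
-- 			nobase.append(base)
-- 	#return(nobase)
--
-- 	nrnobase = len(nobase)
-- 	if nrnobase <= threshold:
-- 		return("True")
-- 	else:
-- 		return("False")
-- ===== SOURCE B (Python) =====
-- def countbases(DNAseq, threshold):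
--     seq = DNAseq.lower()
--     hist = {}
--     for base in seq:
--         hist[base] = hist.get(base, 0) + 1
--     invalid = len(seq) - hist.get('a', 0) - hist.get('c', 0) - hist.get('g', 0) - hist.get('t', 0)
--     return "True" if invalid <= threshold else "False"
-- ===== Notes on version B (the rewrite author's own statement) =====
-- stated objective: alternative
-- what changed: B builds a character histogram (dict) in one pass and computes the invalid-base count as length minus the summed counts of 'a','c','g','t', instead of appending each non-ACGT character to a list and measuring its length.
import Mathlib
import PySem

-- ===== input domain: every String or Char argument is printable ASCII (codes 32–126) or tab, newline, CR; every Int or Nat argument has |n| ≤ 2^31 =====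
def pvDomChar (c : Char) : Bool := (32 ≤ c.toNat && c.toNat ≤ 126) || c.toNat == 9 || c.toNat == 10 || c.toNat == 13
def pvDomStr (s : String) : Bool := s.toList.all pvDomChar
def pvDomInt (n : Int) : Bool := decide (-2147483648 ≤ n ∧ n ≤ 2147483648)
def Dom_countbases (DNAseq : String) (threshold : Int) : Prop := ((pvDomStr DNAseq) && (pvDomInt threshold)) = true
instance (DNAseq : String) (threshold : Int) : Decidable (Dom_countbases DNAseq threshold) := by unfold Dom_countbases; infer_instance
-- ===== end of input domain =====

-- B builds a one-pass character histogram and derives the invalid count as length minus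
-- the summed counts of 'a','c','g','t', instead of collecting the invalid bases in a list.

-- ===== PORT A =====
def countbases (DNAseq : String) (threshold : Int) : String :=
  let seq := PySem.Str.lower DNAseq
  let nobase : List Char :=
    seq.toList.foldl
      (fun acc base =>
        if base ≠ 'a' ∧ base ≠ 't' ∧ base ≠ 'g' ∧ base ≠ 'c' then acc ++ [base] else acc)
      []
  let nrnobase : Int := (nobase.length : Int)
  if nrnobase ≤ threshold then "True" else "False"

-- ===== PORT B =====
def countbases_alt (DNAseq : String) (threshold : Int) : String :=
  let l := (PySem.Str.lower DNAseq).toList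
  let hist : PySem.Dict Char Int :=
    l.foldl (fun d x => d.insert x (d.getD x 0 + 1)) PySem.Dict.empty
  let invalid : Int :=
    (l.length : Int) - hist.getD 'a' 0 - hist.getD 'c' 0 - hist.getD 'g' 0 - hist.getD 't' 0
  if invalid ≤ threshold then "True" else "False"

-- ===== PRECONDITION & SPEC =====
def Spec_countbases (DNAseq : String) (threshold : Int) (out : String) : Prop := out = countbases_alt DNAseq threshold
instance (DNAseq : String) (threshold : Int) (out : String) : Decidable (Spec_countbases DNAseq threshold out) := by unfold Spec_countbases; infer_instance

-- ===== CLAIM (what is proved, stated in full; the proofs are below) =====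
def Claim_equal_countbases : Prop := ∀ (DNAseq : String) (threshold : Int), Dom_countbases DNAseq threshold → Spec_countbases DNAseq threshold (countbases DNAseq threshold)

-- ===== LEMMAS AND PROOFS =====

-- the non-ACGT count equals length minus the four letter counts
lemma countP_nonacgt (l : List Char) :
    (l.filter (fun base => decide (base ≠ 'a' ∧ base ≠ 't' ∧ base ≠ 'g' ∧ base ≠ 'c'))).length
      + l.count 'a' + l.count 'c' + l.count 'g' + l.count 't' = l.length := by
  induction l with
  | nil => simp
  | cons h t ih =>
    simp only [List.filter_cons, List.count_cons, List.length_cons]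
    by_cases ha : h = 'a' <;> by_cases hc : h = 'c' <;> by_cases hg : h = 'g' <;>
      by_cases ht : h = 't' <;> simp_all <;> omega

-- ===== VERDICT (by name: the statement is the Claim_ definition above) =====
theorem countbases_spec : Claim_equal_countbases := by
  intro DNAseq threshold _
  unfold Spec_countbases countbases countbases_alt
  simp only [PySem.List.foldl_append_ite_eq_filter, List.nil_append,
    PySem.Dict.getD_foldl_insert_add_one, PySem.Dict.getD_empty]
  have hfc : ((List.filter (fun x => decide (x ≠ 'a' ∧ x ≠ 't' ∧ x ≠ 'g' ∧ x ≠ 'c'))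
        (PySem.Str.lower DNAseq).toList).length : Int)
      = ((PySem.Str.lower DNAseq).toList.length : Int)
          - (0 + ((PySem.Str.lower DNAseq).toList.count 'a' : Int))
          - (0 + ((PySem.Str.lower DNAseq).toList.count 'c' : Int))
          - (0 + ((PySem.Str.lower DNAseq).toList.count 'g' : Int))
          - (0 + ((PySem.Str.lower DNAseq).toList.count 't' : Int)) := by
    have h := countP_nonacgt (PySem.Str.lower DNAseq).toList
    omega
  rw [hfc]
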